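-- pv_equiv track=rewrite | github.com/suman1406/DSA_Practice_Questions | min_refill.py | min_refill
-- ===== SOURCE A (Python) =====
-- def min_refill(n, k, watering_holes):
--     refills = []
--     i = 0 # Starting distance
--
--     # Start from the initial position (mile 0) and go up to the destination
--     while i < n:
--         j = i
--
--         # Try to move as far as possible within range 'k'
--         while i < n and watering_holes[i] - watering_holes[j] <= k:
--             i += 1
--
--         # If no progress was made, it's impossible to proceed
--         if i == j:
--             return "No Solution"
--
--         # If we haven't reached the destination, record the last watering hole where we refill
--         if i < n:
--             refills.append(watering_holes[i-1])
--
--     return refills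
-- ===== SOURCE B (Python) =====
-- def min_refill(n, k, watering_holes):
--     if n <= 0:
--         return []
--     # stage 1: materialize the running anchor sequence (anchor in effect at each hole)
--     anchors = [watering_holes[0]]
--     for i in range(1, n):
--         a = anchors[-1]
--         anchors.append(watering_holes[i] if watering_holes[i] - a > k else a)
--     # stage 2: a refill stop is recorded just before each point where the anchor changes
--     return [watering_holes[i - 1] for i in range(1, n) if anchors[i] != anchors[i - 1]]
-- ===== Notes on version B (the rewrite author's own statement) =====
-- stated objective: alternative
-- what changed: Replaces A's nested while loops (index anchor j, in-loop impossibility check) by a two-stage pipeline: a first pass materializes the running anchor sequence as a list, and a second pass derives the refill stops as the positions where that sequence changes.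
-- outside the precondition, e.g. on min_refill(2, -1, [0, 5]): A returns 'No Solution', B returns [0]
import Mathlib
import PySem

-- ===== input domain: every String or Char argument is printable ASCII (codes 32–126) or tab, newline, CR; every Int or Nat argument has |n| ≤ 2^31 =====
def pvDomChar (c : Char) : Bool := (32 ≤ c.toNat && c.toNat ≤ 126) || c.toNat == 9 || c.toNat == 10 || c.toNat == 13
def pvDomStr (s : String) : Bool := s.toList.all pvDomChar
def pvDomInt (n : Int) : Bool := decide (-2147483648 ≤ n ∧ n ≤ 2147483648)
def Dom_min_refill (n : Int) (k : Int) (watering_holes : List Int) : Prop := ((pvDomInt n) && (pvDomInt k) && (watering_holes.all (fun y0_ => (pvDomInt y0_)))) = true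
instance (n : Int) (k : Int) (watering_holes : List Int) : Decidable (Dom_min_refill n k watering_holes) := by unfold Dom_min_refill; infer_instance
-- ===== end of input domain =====

-- B replaces A's nested while loops by a two-stage pipeline (materialize the anchor sequence,
-- then collect the positions where it changes); equal on Pre_ (in-range indices, and not the
-- k<0 case where A returns the string "No Solution", which is not a List Int).

-- in-range index read; inside Pre_ every access is in range, so the default is never used
def pvGetD (hs : List Int) (i : Int) : Int := (PySem.List.pyGet? hs i).getD 0

-- ===== PORT A =====
-- inner 'while i < n and watering_holes[i] - watering_holes[j] <= k: i += 1'
def mrInner (hs : List Int) (n k j : Int) : Int → Nat → Int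
  | i, 0 => i
  | i, fuel + 1 =>
    if i < n ∧ pvGetD hs i - pvGetD hs j ≤ k then mrInner hs n k j (i + 1) fuel else i

-- outer 'while i < n' loop; on the 'No Solution' path (i == j) Python returns the string
-- "No Solution", outside the declared List Int type — Pre_ excludes those inputs, [] here
def mrOuter (hs : List Int) (n k : Int) : Int → List Int → Nat → List Int
  | _, acc, 0 => acc
  | i, acc, fuel + 1 =>
    if i < n then
      let i' := mrInner hs n k i i (n - i).toNat
      if i' = i then []
      else
        let acc' := if i' < n then acc ++ [pvGetD hs (i' - 1)] else acc
        mrOuter hs n k i' acc' fuel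
    else acc

def min_refill (n : Int) (k : Int) (watering_holes : List Int) : List Int :=
  mrOuter watering_holes n k 0 [] (n.toNat + 1)

-- ===== PORT B =====
-- loop body of stage 1: 'a = anchors[-1]; anchors.append(holes[i] if holes[i] - a > k else a)'
def mrAnchorStep (hs : List Int) (k : Int) (anchors : List Int) (i : Int) : List Int :=
  let a := pvGetD anchors (-1)
  anchors ++ [if pvGetD hs i - a > k then pvGetD hs i else a]

def min_refill_alt (n : Int) (k : Int) (watering_holes : List Int) : List Int :=
  if n ≤ 0 then []
  else
    let anchors := (PySem.List.pyRange 1 n 1).foldl (mrAnchorStep watering_holes k)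
                      [pvGetD watering_holes 0]
    ((PySem.List.pyRange 1 n 1).filter
        (fun i => pvGetD anchors i != pvGetD anchors (i - 1))).map
      (fun i => pvGetD watering_holes (i - 1))

-- ===== PRECONDITION & SPEC =====
-- Pre_ excludes (a) n > len(watering_holes), where both programs raise IndexError, and
-- (b) n > 0 with k < 0, where A returns the string "No Solution" — not a value of List Int.
def Pre_min_refill (n : Int) (k : Int) (watering_holes : List Int) : Prop :=
  0 < n → (n ≤ watering_holes.length ∧ 0 ≤ k)
instance (n : Int) (k : Int) (watering_holes : List Int) : Decidable (Pre_min_refill n k watering_holes) := by unfold Pre_min_refill; infer_instance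

def pvWitness_min_refill : Int × Int × List Int := (3, 4, [0, 3, 7])

def Spec_min_refill (n : Int) (k : Int) (watering_holes : List Int) (out : List Int) : Prop := out = min_refill_alt n k watering_holes
instance (n : Int) (k : Int) (watering_holes : List Int) (out : List Int) : Decidable (Spec_min_refill n k watering_holes out) := by unfold Spec_min_refill; infer_instance

-- ===== CLAIM (what is proved, stated in full; the proofs are below) =====
def Claim_equal_min_refill : Prop := ∀ (n : Int) (k : Int) (watering_holes : List Int), Dom_min_refill n k watering_holes → Pre_min_refill n k watering_holes → Spec_min_refill n k watering_holes (min_refill n k watering_holes)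

-- ===== LEMMAS AND PROOFS =====

-- common reference recursion: scan position i with anchor VALUE a, fuel = (n - i).toNat
def goVal (hs : List Int) (n k : Int) : Nat → Int → Int → List Int
  | 0, _, _ => []
  | fuel + 1, a, i =>
    if i < n then
      if pvGetD hs i - a ≤ k then goVal hs n k fuel a (i + 1)
      else pvGetD hs (i - 1) :: goVal hs n k fuel (pvGetD hs i) (i + 1)
    else []

-- index-anchor recursion matching A's control flow
def mrF (hs : List Int) (n k : Int) : Nat → Int → Int → List Int → List Int
  | 0, _, _, acc => acc
  | fuel + 1, j, i, acc =>
    if i < n then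
      if pvGetD hs i - pvGetD hs j ≤ k then mrF hs n k fuel j (i + 1) acc
      else mrF hs n k fuel i (i + 1) (acc ++ [pvGetD hs (i - 1)])
    else acc

theorem mrInner_le (hs : List Int) (n k j : Int) :
    ∀ (m : Nat) (i : Int), i ≤ mrInner hs n k j i m := by
  intro m
  induction m with
  | zero => intro i; simp [mrInner]
  | succ m ih =>
    intro i
    simp only [mrInner]
    split
    · exact le_trans (by omega) (ih (i + 1))
    · exact le_rfl

-- scanning with mrF equals: run the inner while, then one append step, then continue
theorem mrF_scan (hs : List Int) (n k : Int) :
    ∀ (m : Nat) (j i : Int) (acc : List Int), (n - i).toNat = m →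
    mrF hs n k m j i acc =
      (if mrInner hs n k j i m < n
       then mrF hs n k ((n - (mrInner hs n k j i m + 1)).toNat) (mrInner hs n k j i m)
              (mrInner hs n k j i m + 1) (acc ++ [pvGetD hs (mrInner hs n k j i m - 1)])
       else acc) := by
  intro m
  induction m with
  | zero =>
    intro j i acc hm
    have hin : ¬ i < n := by omega
    simp [mrF, mrInner, hin]
  | succ m ih =>
    intro j i acc hm
    have hin : i < n := by omega
    have hfuel : (n - (i + 1)).toNat = m := by omega
    by_cases hk : pvGetD hs i - pvGetD hs j ≤ k
    · have h1 : mrInner hs n k j i (m + 1) = mrInner hs n k j (i + 1) m := by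
        simp only [mrInner]; rw [if_pos ⟨hin, hk⟩]
      simp only [mrF, if_pos hin, if_pos hk, h1]
      exact ih j (i + 1) acc hfuel
    · have h1 : mrInner hs n k j i (m + 1) = i := by
        simp only [mrInner]; rw [if_neg (by tauto)]
      simp only [mrF, if_pos hin, if_neg hk, h1, hfuel]

theorem mrOuter_eq_mrF (hs : List Int) (n k : Int) (hk : 0 ≤ k) :
    ∀ (fuel : Nat) (j : Int) (acc : List Int), (n - j).toNat < fuel →
    mrOuter hs n k j acc fuel =
      (if j < n then mrF hs n k ((n - (j + 1)).toNat) j (j + 1) acc else acc) := by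
  intro fuel
  induction fuel with
  | zero => intro j acc h; omega
  | succ fuel ih =>
    intro j acc hfuel
    by_cases hj : j < n
    · have hm : (n - j).toNat = (n - (j + 1)).toNat + 1 := by omega
      have hstep : mrInner hs n k j j (n - j).toNat
          = mrInner hs n k j (j + 1) ((n - (j + 1)).toNat) := by
        rw [hm]; simp only [mrInner]; rw [if_pos ⟨hj, by omega⟩]
      have hgt : j + 1 ≤ mrInner hs n k j j (n - j).toNat := by
        rw [hstep]; exact mrInner_le hs n k j _ (j + 1)
      have hne : ¬ mrInner hs n k j j (n - j).toNat = j := by omega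
      simp only [mrOuter, if_pos hj, if_neg hne]
      rw [mrF_scan hs n k ((n - (j + 1)).toNat) j (j + 1) acc (by omega), ← hstep]
      by_cases hilt : mrInner hs n k j j (n - j).toNat < n
      · simp only [if_pos hilt]
        rw [ih _ _ (by omega), if_pos hilt]
      · simp only [if_neg hilt]
        rw [ih _ _ (by omega), if_neg hilt]
    · simp [mrOuter, hj]

-- A's index-anchor recursion computes goVal at the anchor's value, appended to acc
theorem mrF_eq_goVal (hs : List Int) (n k : Int) :
    ∀ (m : Nat) (j i : Int) (acc : List Int),
    mrF hs n k m j i acc = acc ++ goVal hs n k m (pvGetD hs j) i := by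
  intro m
  induction m with
  | zero => intro j i acc; simp [mrF, goVal]
  | succ m ih =>
    intro j i acc
    simp only [mrF, goVal]
    by_cases hin : i < n
    · simp only [if_pos hin]
      by_cases hk : pvGetD hs i - pvGetD hs j ≤ k
      · rw [if_pos hk, if_pos hk, ih]
      · rw [if_neg hk, if_neg hk, ih]
        simp
    · simp [hin]

-- the anchor chain produced by stage 1, as a structural recursion on the index list
def chain (hs : List Int) (k : Int) : Int → List Int → List Int
  | _, [] => []
  | a, i :: rest =>
    let a' := if pvGetD hs i - a > k then pvGetD hs i else a
    a' :: chain hs k a' rest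

theorem foldl_anchorStep_eq_chain (hs : List Int) (k : Int) :
    ∀ (l : List Int) (acc : List Int) (a : Int), PySem.List.pyGet? acc (-1) = some a →
    l.foldl (mrAnchorStep hs k) acc = acc ++ chain hs k a l := by
  intro l
  induction l with
  | nil => intro acc a _; simp [chain]
  | cons i rest ih =>
    intro acc a hlast
    have hget : pvGetD acc (-1) = a := by simp [pvGetD, hlast]
    simp only [List.foldl_cons, chain]
    rw [show mrAnchorStep hs k acc i
          = acc ++ [if pvGetD hs i - a > k then pvGetD hs i else a] by
        simp [mrAnchorStep, hget]]
    rw [ih _ _ (PySem.List.pyGet?_neg_one_append_singleton _ _)]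
    simp

theorem filter_map_eq_goVal (hs : List Int) (n k : Int) (hk : 0 ≤ k) :
    ∀ (m : Nat) (i a : Int) (pre anchors : List Int),
    (n - i).toNat = m → 1 ≤ i → pre.length = i.toNat →
    PySem.List.pyGet? pre (-1) = some a →
    anchors = pre ++ chain hs k a (PySem.List.pyRange i n 1) →
    ((PySem.List.pyRange i n 1).filter
        (fun x => pvGetD anchors x != pvGetD anchors (x - 1))).map
      (fun x => pvGetD hs (x - 1)) = goVal hs n k m a i := by
  intro m
  induction m with
  | zero =>
    intro i a pre anchors hm hi hlen hlast hanc
    rw [PySem.List.pyRange_one_eq_nil (by omega)]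
    simp [goVal]
  | succ m ih =>
    intro i a pre anchors hm hi hlen hlast hanc
    have hin : i < n := by omega
    rw [PySem.List.pyRange_one_cons hin] at hanc ⊢
    simp only [chain] at hanc
    set a' := if pvGetD hs i - a > k then pvGetD hs i else a with ha'
    -- pre.getLast = a as an element fact
    have hprelen : 0 < pre.length := by omega
    have hlast' : pre.getLast? = some a := by
      rwa [PySem.List.pyGet?_neg_one] at hlast
    -- anchors[i-1] = a
    have hAm1 : pvGetD anchors (i - 1) = a := by
      have h1 : (i - 1) = ((pre.length - 1 : Nat) : Int) := by omega
      have h2 : PySem.List.pyGet? anchors (i - 1) = anchors[pre.length - 1]? := by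
        rw [h1, PySem.List.pyGet?_natCast]
      have h3 : anchors[pre.length - 1]? = pre[pre.length - 1]? := by
        rw [hanc]
        exact List.getElem?_append_left (by omega)
      have h4 : pre[pre.length - 1]? = some a := by
        rw [← List.getLast?_eq_getElem?, hlast']
      simp [pvGetD, h2, h3, h4]
    -- anchors[i] = a'
    have hAi : pvGetD anchors i = a' := by
      have h1 : i = ((pre.length : Nat) : Int) := by omega
      have h2 : PySem.List.pyGet? anchors i = some a' := by
        rw [hanc, h1]
        exact PySem.List.pyGet?_append_length _ _ _
      simp [pvGetD, h2]
    by_cases hc : pvGetD hs i - a ≤ k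
    · have ha'a : a' = a := by rw [ha', if_neg (by omega)]
      have hcond : (pvGetD anchors i != pvGetD anchors (i - 1)) = false := by
        simp [hAi, hAm1, ha'a]
      rw [List.filter_cons_of_neg (by simp [hcond])]
      simp only [goVal, if_pos hin, if_pos hc]
      exact ih (i + 1) a (pre ++ [a']) anchors (by omega) (by omega)
        (by simp [hlen]; omega)
        (by rw [ha'a]; exact PySem.List.pyGet?_neg_one_append_singleton _ _)
        (by rw [hanc, ha'a]; simp)
    · have ha'v : a' = pvGetD hs i := by rw [ha', if_pos (by omega)]
      have hcond : (pvGetD anchors i != pvGetD anchors (i - 1)) = true := by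
        simp [hAi, hAm1, ha'v]; omega
      rw [List.filter_cons_of_pos (by simp [hcond])]
      simp only [List.map_cons, goVal, if_pos hin, if_neg hc]
      rw [← ha'v]
      congr 1
      exact ih (i + 1) a' (pre ++ [a']) anchors (by omega) (by omega)
        (by simp [hlen]; omega)
        (PySem.List.pyGet?_neg_one_append_singleton _ _)
        (by rw [hanc]; simp)

-- ===== VERDICT (by name: the statement is the Claim_ definition above) =====
theorem min_refill_spec : Claim_equal_min_refill := by
  intro n k hs _hdom hpre
  unfold Spec_min_refill min_refill min_refill_alt
  by_cases hn : 0 < n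
  · obtain ⟨-, hk⟩ := hpre hn
    rw [if_neg (by omega),
        mrOuter_eq_mrF hs n k hk (n.toNat + 1) 0 [] (by omega),
        if_pos hn, mrF_eq_goVal]
    have h0 : PySem.List.pyGet? [pvGetD hs 0] (-1) = some (pvGetD hs 0) := by
      simp [PySem.List.pyGet?_neg_one]
    rw [foldl_anchorStep_eq_chain hs k _ _ _ h0]
    rw [filter_map_eq_goVal hs n k hk ((n - 1).toNat) 1 (pvGetD hs 0)
          [pvGetD hs 0] _ (by omega) (by omega) (by simp) h0 rfl]
    norm_num
  · rw [if_pos (by omega)]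
    cases h : n.toNat + 1 with
    | zero => omega
    | succ f => simp [mrOuter, hn]
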